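-- pv_equiv track=rewrite | github.com/TRR0Z/roblox-proxy | proxy.py | sanitize_headers
-- ===== SOURCE A (Python) =====
-- def sanitize_headers(headers):
--     to_remove = ["Host", "Proxy-Connection", "Connection", "sec-fetch-", "User-Agent", "Accept-Encoding", "Content-Length"]
--     for kn in to_remove:
--         kn = kn.lower()
--         for kn2 in list(headers.keys()):
--             if kn2.lower().startswith(kn):
--                 del headers[kn2]
--     return headers
-- ===== SOURCE B (Python) =====
-- def sanitize_headers(headers):
--     prefixes = tuple(p.lower() for p in ("Host", "Proxy-Connection", "Connection", "sec-fetch-", "User-Agent", "Accept-Encoding", "Content-Length"))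
--     kept = {k: v for k, v in headers.items() if not k.lower().startswith(prefixes)}
--     headers.clear()
--     headers.update(kept)
--     return headers
-- ===== Notes on version B (the rewrite author's own statement) =====
-- stated objective: idiomatic
-- what changed: A repeatedly scans the dict and deletes matching keys (one pass per forbidden prefix); B constructs the complement in one dict comprehension using startswith with a tuple of lowercased prefixes (no inner Python loop) and replaces the dict contents in place via clear()/update().
import Mathlib
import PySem

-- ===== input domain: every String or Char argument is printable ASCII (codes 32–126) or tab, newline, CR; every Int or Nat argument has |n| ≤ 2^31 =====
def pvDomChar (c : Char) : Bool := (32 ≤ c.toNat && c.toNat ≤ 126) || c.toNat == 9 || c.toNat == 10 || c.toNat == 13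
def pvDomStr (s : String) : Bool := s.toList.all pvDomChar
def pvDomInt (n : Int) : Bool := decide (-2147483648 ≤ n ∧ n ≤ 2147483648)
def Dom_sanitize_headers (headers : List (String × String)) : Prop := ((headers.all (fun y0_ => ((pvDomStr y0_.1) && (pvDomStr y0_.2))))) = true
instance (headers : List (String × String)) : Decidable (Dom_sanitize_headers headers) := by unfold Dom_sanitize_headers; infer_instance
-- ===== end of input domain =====

-- B replaces A's repeated scan-and-delete passes (one per forbidden prefix) by constructing the
-- complement: one dict comprehension keeping the non-matching entries (startswith on a tuple of
-- lowercased prefixes), then clear()/update() to put them back in place. Both Pythons mutate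
-- `headers` in place and return it; the claim is about the returned value (= the final dict state).


-- `del d[k]` on the association-list view of a dict: drop the entries whose key is k
def delKey (h : List (String × String)) (k : String) : List (String × String) :=
  h.filter (fun p => !(p.1 == k))

-- ===== PORT A =====
def sanitize_headers (headers : List (String × String)) : List (String × String) :=
  let to_remove := ["Host", "Proxy-Connection", "Connection", "sec-fetch-", "User-Agent", "Accept-Encoding", "Content-Length"]
  to_remove.foldl (fun h kn =>
    let knl := PySem.Str.lower kn
    (h.map Prod.fst).foldl (fun h' kn2 =>
      if PySem.Str.startswith (PySem.Str.lower kn2) knl then delKey h' kn2 else h') h) headers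

-- ===== PORT B =====
-- `k.lower().startswith(prefixes)` with a tuple = true iff it starts with ANY of them
def sanitize_headers_alt (headers : List (String × String)) : List (String × String) :=
  let prefixes := (["Host", "Proxy-Connection", "Connection", "sec-fetch-", "User-Agent", "Accept-Encoding", "Content-Length"]).map PySem.Str.lower
  let kept := headers.filter
    (fun p => !(prefixes.any (fun pre => PySem.Str.startswith (PySem.Str.lower p.1) pre)))
  -- headers.clear(); headers.update(kept): the dict's final contents are exactly `kept`
  kept

-- ===== PRECONDITION & SPEC =====
def Spec_sanitize_headers (headers : List (String × String)) (out : List (String × String)) : Prop := out = sanitize_headers_alt headers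
instance (headers : List (String × String)) (out : List (String × String)) : Decidable (Spec_sanitize_headers headers out) := by unfold Spec_sanitize_headers; infer_instance

-- ===== CLAIM (what is proved, stated in full; the proofs are below) =====
def Claim_equal_sanitize_headers : Prop := ∀ (headers : List (String × String)), Dom_sanitize_headers headers → Spec_sanitize_headers headers (sanitize_headers headers)

-- ===== LEMMAS AND PROOFS =====

-- a fold whose body fires only when `c b` holds is a fold over the filtered list
theorem foldl_if_filter {α β : Type} (c : β → Bool) (f : α → β → α) (l : List β) (a : α) :
    l.foldl (fun a b => if c b then f a b else a) a = (l.filter c).foldl f a := by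
  induction l generalizing a with
  | nil => rfl
  | cons b l ih => by_cases h : c b = true <;> simp [h, ih]

-- deleting every key of ks in turn = one filter on key-membership in ks
theorem foldl_delKey (ks : List String) (h : List (String × String)) :
    ks.foldl (fun h' k => delKey h' k) h = h.filter (fun p => !(ks.contains p.1)) := by
  induction ks generalizing h with
  | nil => simp
  | cons k ks ih =>
      rw [List.foldl_cons, ih, delKey, List.filter_filter]
      apply List.filter_congr
      intro p _
      by_cases hk : p.1 = k <;> simp [hk, Bool.and_comm]

-- one scan-and-delete pass over the current keys (A's inner loop) is a filter by ¬ c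
theorem pass_eq (c : String → Bool) (h : List (String × String)) :
    (h.map Prod.fst).foldl (fun h' k => if c k then delKey h' k else h') h
      = h.filter (fun p => !(c p.1)) := by
  rw [foldl_if_filter, foldl_delKey]
  apply List.filter_congr
  intro p hp
  have hm : p.1 ∈ h.map Prod.fst := List.mem_map.mpr ⟨p, hp, rfl⟩
  congr 1
  by_cases hc : c p.1 = true
  · rw [hc, List.contains_eq_any_beq]
    exact List.any_eq_true.mpr ⟨p.1, List.mem_filter.mpr ⟨hm, hc⟩, by simp⟩
  · simp only [Bool.not_eq_true] at hc
    rw [hc, List.contains_eq_any_beq]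
    apply List.any_eq_false.mpr
    intro x hx hb
    rcases List.mem_filter.mp hx with ⟨_, hcx⟩
    rw [← eq_of_beq hb, hc] at hcx
    exact Bool.false_ne_true hcx

-- ===== VERDICT (by name: the statement is the Claim_ definition above) =====
theorem sanitize_headers_spec : Claim_equal_sanitize_headers := by
  intro headers _
  show sanitize_headers headers = sanitize_headers_alt headers
  simp only [sanitize_headers, sanitize_headers_alt, List.map, List.foldl, pass_eq,
    List.filter_filter]
  apply List.filter_congr
  intro p _
  simp only [List.any_cons, List.any_nil, Bool.or_false]
  cases PySem.Str.startswith (PySem.Str.lower p.1) (PySem.Str.lower "Host") <;>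
  cases PySem.Str.startswith (PySem.Str.lower p.1) (PySem.Str.lower "Proxy-Connection") <;>
  cases PySem.Str.startswith (PySem.Str.lower p.1) (PySem.Str.lower "Connection") <;>
  cases PySem.Str.startswith (PySem.Str.lower p.1) (PySem.Str.lower "sec-fetch-") <;>
  cases PySem.Str.startswith (PySem.Str.lower p.1) (PySem.Str.lower "User-Agent") <;>
  cases PySem.Str.startswith (PySem.Str.lower p.1) (PySem.Str.lower "Accept-Encoding") <;>
  cases PySem.Str.startswith (PySem.Str.lower p.1) (PySem.Str.lower "Content-Length") <;> rfl
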